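-- pv_equiv track=rewrite | github.com/hiqua/isadent | indent.py | get_kws
-- ===== SOURCE A (Python) =====
-- def get_kws(s):
--     """
--     Get the (first) word of the line, if there is one
--     >>> get_kws('ultimately show "random thing"')
--     'ultimately'
--     >>> get_kws('qed')
--     'qed'
--     >>> get_kws(' proof(')
--     'proof'
--     """
--     s = s.strip()
--     delimiters = ['"',' ','(']
--     #index = [qm=s.find('"'),sp=s.find(' '),pa=s.find('(')]
--     index = [s.find(a) for a in delimiters]
--     index = [i for i in index if i != -1]
--     if index != []:
--         return s[0:min(index)].strip()
--     else:
--         return s[0:].strip()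
-- ===== SOURCE B (Python) =====
-- def get_kws(s):
--     s = s.strip()
--     buf = []
--     for ch in s:
--         if ch in ('"', ' ', '('):
--             break
--         buf.append(ch)
--     return ''.join(buf).strip()
-- ===== Notes on version B (the rewrite author's own statement) =====
-- stated objective: simpler
-- what changed: Replaces the three separate str.find calls, the -1 filtering and min() over the index list by a single left-to-right scan that accumulates characters and breaks at the first delimiter.
import Mathlib
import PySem

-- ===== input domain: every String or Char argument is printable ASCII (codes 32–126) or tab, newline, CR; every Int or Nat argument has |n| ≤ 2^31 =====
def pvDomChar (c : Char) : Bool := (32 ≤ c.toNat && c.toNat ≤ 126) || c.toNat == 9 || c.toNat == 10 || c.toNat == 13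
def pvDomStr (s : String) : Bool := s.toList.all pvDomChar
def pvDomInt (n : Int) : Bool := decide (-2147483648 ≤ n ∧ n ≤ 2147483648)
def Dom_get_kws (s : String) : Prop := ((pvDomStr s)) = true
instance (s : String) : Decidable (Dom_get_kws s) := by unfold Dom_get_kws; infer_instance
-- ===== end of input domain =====

-- B replaces the three find calls, the -1 filter and the min() over them by one
-- left-to-right scan that stops at the first delimiter (simpler decomposition).

-- ===== PORT A =====
def get_kws (s : String) : String :=
  let s' := PySem.Str.strip s
  let delimiters : List String := ["\"", " ", "("]
  let index := delimiters.map (fun a => PySem.Str.find s' a)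
  let index2 := index.filter (fun i => i ≠ -1)
  match PySem.List.min? index2 (fun i => i) with
  | some m => PySem.Str.strip (PySem.Str.slice s' (some 0) (some m))
  | none => PySem.Str.strip (PySem.Str.slice s' (some 0) none)

-- ===== PORT B =====
-- the for-loop with break, as structural recursion over the characters
def kwBuf : List Char → List Char
  | [] => []
  | c :: rest => if c = '"' || c = ' ' || c = '(' then [] else c :: kwBuf rest

def get_kws_alt (s : String) : String :=
  PySem.Str.strip (String.ofList (kwBuf (PySem.Str.strip s).toList))

-- ===== PRECONDITION & SPEC =====
def Spec_get_kws (s : String) (out : String) : Prop := out = get_kws_alt s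
instance (s : String) (out : String) : Decidable (Spec_get_kws s out) := by unfold Spec_get_kws; infer_instance

-- ===== CLAIM (what is proved, stated in full; the proofs are below) =====
def Claim_equal_get_kws : Prop := ∀ (s : String), Dom_get_kws s → Spec_get_kws s (get_kws s)

-- ===== LEMMAS AND PROOFS =====

def isDelim (c : Char) : Bool := c = '"' || c = ' ' || c = '('

lemma singleton_prefix_iff (c : Char) (l : List Char) : [c] <+: l ↔ l[0]? = some c := by
  constructor
  · rintro ⟨u, rfl⟩; rfl
  · intro h
    cases l with
    | nil => simp at h
    | cons x xs => simp at h; subst h; exact ⟨xs, rfl⟩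

lemma occ_iff (c : Char) (t : List Char) (j : Nat) : [c] <+: t.drop j ↔ t[j]? = some c := by
  rw [singleton_prefix_iff]
  simp

lemma kwBuf_eq_take (t : List Char) (m : Nat)
    (h1 : ∀ i, i < m → ∀ c, t[i]? = some c → isDelim c = false)
    (h2 : ∀ c, t[m]? = some c → isDelim c = true) :
    kwBuf t = t.take m := by
  induction t generalizing m with
  | nil => simp [kwBuf]
  | cons c rest ih =>
    cases m with
    | zero =>
      have hd := h2 c (by simp)
      simp only [isDelim] at hd
      simp [kwBuf, hd]
    | succ m =>
      have hd := h1 0 (by omega) c (by simp)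
      simp only [isDelim] at hd
      simp [kwBuf, hd]
      exact ih m (fun i hi c' hc => h1 (i+1) (by omega) c' (by simpa using hc))
        (fun c' hc => h2 c' (by simpa using hc))

lemma find_delim (t : List Char) (c : Char) (h : PySem.Chars.find t [c] = -1) :
    ∀ j : Nat, t[j]? ≠ some c := by
  intro j hj
  rw [PySem.Chars.find_eq_neg_one_iff] at h
  rcases (occ_iff c t j).mpr hj with ⟨u, hu⟩
  refine h ⟨t.take j, u, ?_⟩
  rw [List.append_assoc, hu, List.take_append_drop]

lemma below_min (t : List Char) (m : Int) (c : Char)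
    (hle : m ≤ PySem.Chars.find t [c] ∨ PySem.Chars.find t [c] = -1)
    (i : Nat) (hi : (i : Int) < m) : t[i]? ≠ some c := by
  rcases hle with hle | hf
  · intro hc
    have h0f : (0 : Int) ≤ PySem.Chars.find t [c] := by omega
    have hspec := PySem.Chars.find_spec (s := t) (sub := [c]) h0f
    exact hspec.2 i (by omega) ((occ_iff c t i).mpr hc)
  · exact find_delim t c hf i

lemma kwBuf_take_of_min (t : List Char) (m : Int) (c₀ : Char)
    (hc₀ : isDelim c₀ = true)
    (hmc : m = PySem.Chars.find t [c₀])
    (hm0 : 0 ≤ m)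
    (hq : m ≤ PySem.Chars.find t ['"'] ∨ PySem.Chars.find t ['"'] = -1)
    (hs : m ≤ PySem.Chars.find t [' '] ∨ PySem.Chars.find t [' '] = -1)
    (hp : m ≤ PySem.Chars.find t ['('] ∨ PySem.Chars.find t ['('] = -1) :
    kwBuf t = t.take m.toNat := by
  apply kwBuf_eq_take
  · intro i hi c hc
    by_contra hdc
    rw [Bool.not_eq_false] at hdc
    have hi' : (i : Int) < m := by omega
    simp only [isDelim, Bool.or_eq_true, decide_eq_true_eq] at hdc
    rcases hdc with (rfl | rfl) | rfl
    exacts [below_min t m _ hq i hi' hc, below_min t m _ hs i hi' hc,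
      below_min t m _ hp i hi' hc]
  · intro c hc
    have h0f : (0 : Int) ≤ PySem.Chars.find t [c₀] := hmc ▸ hm0
    have hocc := (PySem.Chars.find_spec h0f).1
    rw [occ_iff] at hocc
    rw [← hmc] at hocc
    rw [hocc] at hc
    obtain rfl : c₀ = c := by injection hc
    exact hc₀

lemma get_kws_eq (s : String) : get_kws s = get_kws_alt s := by
  unfold get_kws get_kws_alt
  set s' := PySem.Str.strip s with hs'
  set t := s'.toList with ht
  have hq : PySem.Str.find s' "\"" = PySem.Chars.find t ['"'] := by
    simp [PySem.Str.find_eq]; rfl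
  have hsp : PySem.Str.find s' " " = PySem.Chars.find t [' '] := by
    simp [PySem.Str.find_eq]; rfl
  have hpa : PySem.Str.find s' "(" = PySem.Chars.find t ['('] := by
    simp [PySem.Str.find_eq]; rfl
  simp only [List.map_cons, List.map_nil, hq, hsp, hpa]
  split
  case _ m hm =>
    -- min of the found indices exists
    have hmem := PySem.List.min?_mem hm
    have hmin := PySem.List.min?_isMin hm
    simp only [List.mem_filter, decide_eq_true_eq, ne_eq] at hmem
    obtain ⟨hmem, hne⟩ := hmem
    have hm0 : 0 ≤ m := by
      have h1 := PySem.Chars.neg_one_le_find t ['"']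
      have h2 := PySem.Chars.neg_one_le_find t [' ']
      have h3 := PySem.Chars.neg_one_le_find t ['(']
      simp only [List.mem_cons, List.not_mem_nil, or_false] at hmem
      rcases hmem with rfl | rfl | rfl <;> omega
    have hle : ∀ c : Char, PySem.Chars.find t [c] ∈
        [PySem.Chars.find t ['"'], PySem.Chars.find t [' '], PySem.Chars.find t ['(']] →
        m ≤ PySem.Chars.find t [c] ∨ PySem.Chars.find t [c] = -1 := by
      intro c hcmem
      by_cases hf : PySem.Chars.find t [c] = -1
      · exact Or.inr hf
      · exact Or.inl (hmin _ (by simp only [List.mem_filter]; exact ⟨hcmem, by simpa using hf⟩))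
    have hbuf : kwBuf t = t.take m.toNat := by
      simp only [List.mem_cons, List.not_mem_nil, or_false] at hmem
      rcases hmem with hmc | hmc | hmc
      · exact kwBuf_take_of_min t m '"' (by decide) hmc hm0
          (hle _ (by simp)) (hle _ (by simp)) (hle _ (by simp))
      · exact kwBuf_take_of_min t m ' ' (by decide) hmc hm0
          (hle _ (by simp)) (hle _ (by simp)) (hle _ (by simp))
      · exact kwBuf_take_of_min t m '(' (by decide) hmc hm0
          (hle _ (by simp)) (hle _ (by simp)) (hle _ (by simp))
    apply String.toList_inj.mp
    simp only [PySem.Str.toList_strip, PySem.Str.toList_slice, String.toList_ofList,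
      PySem.Chars.slice_eq_listSlice, PySem.List.slice_zero_start, ← ht]
    rw [PySem.List.slice_to _ hm0, hbuf]
  case _ hm =>
    -- no delimiter occurs in the stripped string
    rw [PySem.List.min?_eq_none_iff] at hm
    simp only [List.filter_eq_nil_iff, List.mem_cons, List.not_mem_nil, or_false,
      decide_eq_true_eq, ne_eq, not_not] at hm
    have hall : ∀ i : Nat, i < t.length → ∀ c, t[i]? = some c → isDelim c = false := by
      intro i hi c hc
      by_contra hdc
      rw [Bool.not_eq_false] at hdc
      simp only [isDelim, Bool.or_eq_true, decide_eq_true_eq] at hdc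
      rcases hdc with (rfl | rfl) | rfl
      · exact find_delim t _ (hm _ (Or.inl rfl)) i hc
      · exact find_delim t _ (hm _ (Or.inr (Or.inl rfl))) i hc
      · exact find_delim t _ (hm _ (Or.inr (Or.inr rfl))) i hc
    have hbuf : kwBuf t = t := by
      rw [kwBuf_eq_take t t.length hall (by simp), List.take_length]
    apply String.toList_inj.mp
    simp only [PySem.Str.toList_strip, PySem.Str.toList_slice, String.toList_ofList,
      PySem.Chars.slice_eq_listSlice, PySem.List.slice_zero_start,
      PySem.List.slice_none_none, ← ht]
    rw [hbuf]

-- ===== VERDICT (by name: the statement is the Claim_ definition above) =====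
theorem get_kws_spec : Claim_equal_get_kws := by
  intro s _
  exact get_kws_eq s
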